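-- pv_equiv track=rewrite | github.com/flyconnectome/bigclust2 | bigclust2/gui/widgets/annotations.py | _normalize_project_datasets
-- ===== SOURCE A (Python) =====
-- def _normalize_project_datasets(datasets):
--     """Normalize an optional project dataset list to unique sorted names."""
--     if not datasets:
--         return []
--     return sorted(
--         {
--             str(dataset).strip()
--             for dataset in datasets
--             if str(dataset).strip()
--         }
--     )
-- ===== SOURCE B (Python) =====
-- def _normalize_project_datasets(datasets):
--     """Normalize an optional project dataset list to unique sorted names."""
--     if not datasets:
--         return []
--     items = sorted(s for d in datasets if (s := str(d).strip()))
--     out = []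
--     for s in items:
--         if not out or s != out[-1]:
--             out.append(s)
--     return out
-- ===== Notes on version B (the rewrite author's own statement) =====
-- stated objective: alternative
-- what changed: Replaces set-dedup-then-sort with sort-first then a single adjacent-comparison sweep that appends each name only when it differs from the last appended one.
import Mathlib
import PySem

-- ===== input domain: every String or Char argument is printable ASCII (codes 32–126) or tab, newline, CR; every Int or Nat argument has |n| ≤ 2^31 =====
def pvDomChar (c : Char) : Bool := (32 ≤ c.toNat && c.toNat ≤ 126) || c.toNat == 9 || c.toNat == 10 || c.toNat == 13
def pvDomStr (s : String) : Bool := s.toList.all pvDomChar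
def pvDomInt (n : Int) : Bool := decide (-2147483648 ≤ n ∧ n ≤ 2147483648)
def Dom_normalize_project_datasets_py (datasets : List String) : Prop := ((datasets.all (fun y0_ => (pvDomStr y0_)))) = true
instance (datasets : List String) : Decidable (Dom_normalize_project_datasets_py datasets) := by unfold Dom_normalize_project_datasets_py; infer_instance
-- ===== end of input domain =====

-- B sorts the stripped nonempty names first and deduplicates in one adjacent-comparison sweep,
-- instead of A's set-comprehension dedup followed by sorted(); alternative decomposition, same result.


-- ===== PORT A =====
-- sorted({str(d).strip() for d in datasets if str(d).strip()}); str() on a str is identity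
def normalize_project_datasets_py (datasets : List String) : List String :=
  if datasets = [] then []
  else
    PySem.List.sorted
      (PySem.Set.ofList ((datasets.map PySem.Str.strip).filter (fun s => s ≠ "")))
      (fun x => x) false

-- ===== PORT B =====
def normalize_project_datasets_py_alt (datasets : List String) : List String :=
  if datasets = [] then []
  else
    let items := PySem.List.sorted ((datasets.map PySem.Str.strip).filter (fun s => s ≠ "")) (fun x => x) false
    items.foldl
      (fun out s => if out = [] ∨ s ≠ PySem.List.pyGetD out (-1) "" then out ++ [s] else out) []

-- ===== PRECONDITION & SPEC =====
def Spec_normalize_project_datasets_py (datasets : List String) (out : List String) : Prop := out = normalize_project_datasets_py_alt datasets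
instance (datasets : List String) (out : List String) : Decidable (Spec_normalize_project_datasets_py datasets out) := by unfold Spec_normalize_project_datasets_py; infer_instance

-- ===== CLAIM (what is proved, stated in full; the proofs are below) =====
def Claim_equal_normalize_project_datasets_py : Prop := ∀ (datasets : List String), Dom_normalize_project_datasets_py datasets → Spec_normalize_project_datasets_py datasets (normalize_project_datasets_py datasets)

-- ===== LEMMAS AND PROOFS =====

-- The adjacent-dedup fold over a weakly increasing list, starting from a strictly increasing
-- accumulator all of whose elements are ≤ every remaining element, yields a strictly increasing
-- list whose members are exactly the accumulator's plus the input's.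
theorem pv_dedup_fold (ys : List String) : ∀ (acc : List String),
    ys.Pairwise (· ≤ ·) → acc.Pairwise (· < ·) →
    (∀ a ∈ acc, ∀ y ∈ ys, a ≤ y) →
    (ys.foldl (fun out s => if out = [] ∨ s ≠ PySem.List.pyGetD out (-1) "" then out ++ [s] else out) acc).Pairwise (· < ·) ∧
    (∀ x, x ∈ ys.foldl (fun out s => if out = [] ∨ s ≠ PySem.List.pyGetD out (-1) "" then out ++ [s] else out) acc ↔ x ∈ acc ∨ x ∈ ys) := by
  induction ys with
  | nil =>
    intro acc _ hacc _
    simp only [List.foldl_nil]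
    exact ⟨hacc, fun x => by simp⟩
  | cons y ys ih =>
    intro acc hys hacc hle
    rw [List.pairwise_cons] at hys
    simp only [List.foldl_cons]
    rcases acc.eq_nil_or_concat with rfl | ⟨as, l, rfl⟩
    · -- empty accumulator: append y
      have hstep : (if ([] : List String) = [] ∨ y ≠ PySem.List.pyGetD [] (-1) "" then ([] : List String) ++ [y] else []) = [y] := by simp
      rw [hstep]
      obtain ⟨h1, h2⟩ := ih [y] hys.2 (by simp)
        (by intro a ha z hz; simp only [List.mem_singleton] at ha; subst ha; exact hys.1 z hz)
      refine ⟨h1, fun x => ?_⟩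
      rw [h2 x]; simp
    · -- nonempty accumulator with last element l
      rw [List.concat_eq_append] at hacc hle ⊢
      have hlast : PySem.List.pyGetD (as ++ [l]) (-1) "" = l :=
        PySem.List.pyGetD_neg_one_append_singleton as l ""
      have haslt : ∀ x ∈ as, x < l := by
        intro x hx
        have := (List.pairwise_append.1 hacc).2.2 x hx l (by simp)
        exact this
      by_cases hne : y = l
      · -- duplicate of the last appended name: skip
        have hstep : (if as ++ [l] = [] ∨ y ≠ PySem.List.pyGetD (as ++ [l]) (-1) "" then (as ++ [l]) ++ [y] else as ++ [l]) = as ++ [l] := by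
          rw [if_neg]; simp [hlast, hne]
        rw [hstep]
        obtain ⟨h1, h2⟩ := ih (as ++ [l]) hys.2 hacc
          (by intro a ha z hz; exact hle a ha z (List.mem_cons_of_mem _ hz))
        refine ⟨h1, fun x => ?_⟩
        rw [h2 x]
        constructor
        · rintro (h | h)
          · exact Or.inl h
          · exact Or.inr (List.mem_cons_of_mem _ h)
        · rintro (h | h)
          · exact Or.inl h
          · rcases List.mem_cons.1 h with rfl | h
            · exact Or.inl (by simp [hne])
            · exact Or.inr h
      · -- new name: append
        have hstep : (if as ++ [l] = [] ∨ y ≠ PySem.List.pyGetD (as ++ [l]) (-1) "" then (as ++ [l]) ++ [y] else as ++ [l]) = (as ++ [l]) ++ [y] := by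
          rw [if_pos]; right; simp [hlast, hne]
        rw [hstep]
        have hly : l < y :=
          lt_of_le_of_ne (hle l (by simp) y (by simp)) (fun h => hne h.symm)
        have hacc' : ((as ++ [l]) ++ [y]).Pairwise (· < ·) := by
          rw [List.pairwise_append]
          refine ⟨hacc, by simp, ?_⟩
          intro a ha b hb
          simp only [List.mem_singleton] at hb; subst hb
          rcases List.mem_append.1 ha with h | h
          · exact lt_trans (haslt a h) hly
          · simp only [List.mem_singleton] at h; subst h; exact hly
        obtain ⟨h1, h2⟩ := ih ((as ++ [l]) ++ [y]) hys.2 hacc'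
          (by
            intro a ha z hz
            rcases List.mem_append.1 ha with h | h
            · exact hle a h z (List.mem_cons_of_mem _ hz)
            · simp only [List.mem_singleton] at h; subst h; exact hys.1 z hz)
        refine ⟨h1, fun x => ?_⟩
        rw [h2 x]; simp; tauto

-- ===== VERDICT (by name: the statement is the Claim_ definition above) =====
theorem normalize_project_datasets_py_spec : Claim_equal_normalize_project_datasets_py := by
  intro datasets _
  unfold Spec_normalize_project_datasets_py normalize_project_datasets_py normalize_project_datasets_py_alt
  by_cases hnil : datasets = []
  · simp [hnil]
  · rw [if_neg hnil, if_neg hnil]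
    set xs := (datasets.map PySem.Str.strip).filter (fun s => s ≠ "") with hxs
    have hA1 : (PySem.List.sorted (PySem.Set.ofList xs) (fun x => x) false).Pairwise (· < ·) :=
      PySem.List.sorted_ofList_pairwise_lt xs
    obtain ⟨hB1, hB2⟩ := pv_dedup_fold (PySem.List.sorted xs (fun x => x) false) []
      (by simpa using PySem.List.sorted_pairwise xs (fun x => x)) (by simp) (by simp)
    have hmem : ∀ x, x ∈ PySem.List.sorted (PySem.Set.ofList xs) (fun x => x) false ↔
        x ∈ (PySem.List.sorted xs (fun x => x) false).foldl
          (fun out s => if out = [] ∨ s ≠ PySem.List.pyGetD out (-1) "" then out ++ [s] else out) [] := by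
      intro x
      rw [PySem.List.mem_sorted, PySem.Set.mem_ofList, hB2 x, PySem.List.mem_sorted]
      simp
    have hperm := (List.perm_ext_iff_of_nodup hA1.nodup hB1.nodup).2 hmem
    exact hperm.eq_of_pairwise (fun a b _ _ h1 h2 => absurd h1 (asymm h2)) hA1 hB1
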